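-- pv_equiv track=rewrite | github.com/mapoferri/Bioinformatics-projects | evaluation_kclassmatrix.py | multi_class_evaluation
-- ===== SOURCE A (Python) =====
-- def multi_class_evaluation(ss_original,ss_predicted):
-- 	multi_matrix = [[0,0,0],[0,0,0],[0,0,0]]
-- 	#print (len(ss_original))
--
-- 	for x in range(len(ss_original)):
--
-- 		#print (x)
-- 		#for y in range(len(ss_predicted)):
-- 		if ss_original[x] == 'H' and ss_predicted[x] == 'H':
-- 							#print (ss_predicted[residue])
-- 			multi_matrix[0][0] += 1
-- 							#position[0][0] in the matrix
-- 		elif ss_original[x] == 'H' and ss_predicted[x] =='E':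
-- 			multi_matrix[1][0] += 1
-- 		elif ss_original[x] == 'H' and ss_predicted[x] =='-':
-- 			multi_matrix[2][0] += 1
-- 		elif ss_original[x] == 'E' and ss_predicted[x] =='H':
-- 			multi_matrix[0][1] += 1
-- 		elif ss_original[x] == 'E' and ss_predicted[x] == 'E':
-- 			multi_matrix[1][1] += 1
-- 		elif ss_original[x] == 'E' and ss_predicted[x] == '-':
-- 			multi_matrix[2][1] += 1
-- 		elif ss_original[x] == '-' and ss_predicted[x] == 'H':
-- 			multi_matrix[0][2] += 1
-- 		elif ss_original[x] == '-' and ss_predicted[x] == 'E':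
-- 			multi_matrix[1][2] += 1
-- 		elif ss_original[x] == '-' and ss_predicted[x] == '-':
-- 			multi_matrix[2][2] += 1
-- 		else:
-- 			continue
-- 	#print (multi_matrix)
-- 	return (multi_matrix)
-- ===== SOURCE B (Python) =====
-- def multi_class_evaluation(ss_original, ss_predicted):
--     labels = ['H', 'E', '-']
--     pairs = list(zip(ss_original, ss_predicted))
--     return [[pairs.count((o, p)) for o in labels] for p in labels]
-- ===== Notes on version B (the rewrite author's own statement) =====
-- stated objective: alternative
-- what changed: Instead of a single pass that increments cells of a mutable 3x3 matrix through a nine-case if-elif ladder, B builds the pair list once and then constructs the matrix declaratively, each cell computed independently as pairs.count((o,p)) over the label pair grid (staged counting passes, no accumulator matrix).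
import Mathlib
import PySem

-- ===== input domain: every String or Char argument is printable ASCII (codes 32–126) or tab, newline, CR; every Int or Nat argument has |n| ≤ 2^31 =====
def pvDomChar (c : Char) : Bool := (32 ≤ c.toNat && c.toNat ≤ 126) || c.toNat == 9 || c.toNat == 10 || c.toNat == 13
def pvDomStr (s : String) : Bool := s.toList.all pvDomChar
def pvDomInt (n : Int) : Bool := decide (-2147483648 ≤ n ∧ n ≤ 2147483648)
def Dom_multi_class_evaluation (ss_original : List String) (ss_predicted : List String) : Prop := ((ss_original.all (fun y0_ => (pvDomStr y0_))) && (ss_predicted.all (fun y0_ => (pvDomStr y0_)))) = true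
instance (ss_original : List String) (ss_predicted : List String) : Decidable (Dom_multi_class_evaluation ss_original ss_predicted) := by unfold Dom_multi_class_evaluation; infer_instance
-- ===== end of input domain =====

-- B replaces A's accumulating single pass (nine-case if-elif ladder incrementing a mutable
-- matrix) by a declarative construction: each of the nine cells is computed independently as
-- a count of its label pair over the zipped list (alternative decomposition, same O(n) class).

-- ===== PORT A =====
-- multi_matrix[i][j] += 1 (i, j are the literal indices 0..2 appearing in A's source)
def pvBump (m : List (List Int)) (i j : Nat) : List (List Int) :=
  m.modify i (fun r => r.modify j (· + 1))

def multi_class_evaluation (ss_original : List String) (ss_predicted : List String) : List (List Int) :=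
  (PySem.List.pyRange 0 (PySem.List.len ss_original) 1).foldl
    (fun multi_matrix x =>
      -- ss_original[x] / ss_predicted[x]; indices produced by range are in range for
      -- ss_original, and Pre_ guarantees ss_predicted is only read in range (else Python raises)
      let so := PySem.List.pyGetD ss_original x ""
      let sp := PySem.List.pyGetD ss_predicted x ""
      if so = "H" ∧ sp = "H" then pvBump multi_matrix 0 0
      else if so = "H" ∧ sp = "E" then pvBump multi_matrix 1 0
      else if so = "H" ∧ sp = "-" then pvBump multi_matrix 2 0
      else if so = "E" ∧ sp = "H" then pvBump multi_matrix 0 1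
      else if so = "E" ∧ sp = "E" then pvBump multi_matrix 1 1
      else if so = "E" ∧ sp = "-" then pvBump multi_matrix 2 1
      else if so = "-" ∧ sp = "H" then pvBump multi_matrix 0 2
      else if so = "-" ∧ sp = "E" then pvBump multi_matrix 1 2
      else if so = "-" ∧ sp = "-" then pvBump multi_matrix 2 2
      else multi_matrix)
    [[0,0,0],[0,0,0],[0,0,0]]

-- ===== PORT B =====
def multi_class_evaluation_alt (ss_original : List String) (ss_predicted : List String) : List (List Int) :=
  let labels : List String := ["H", "E", "-"]
  let pairs := ss_original.zip ss_predicted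
  labels.map (fun p => labels.map (fun o => (PySem.List.count pairs (o, p) : Int)))

-- ===== PRECONDITION & SPEC =====
-- Pre_ excludes exactly the inputs where A raises IndexError: a class character of
-- ss_original at an index beyond the end of ss_predicted.
def Pre_multi_class_evaluation (ss_original : List String) (ss_predicted : List String) : Prop :=
  ∀ i : Fin ss_original.length,
    ss_original[i] ∈ (["H", "E", "-"] : List String) → (i : Nat) < ss_predicted.length
instance (ss_original : List String) (ss_predicted : List String) : Decidable (Pre_multi_class_evaluation ss_original ss_predicted) := by unfold Pre_multi_class_evaluation; infer_instance

def pvWitness_multi_class_evaluation : List String × List String :=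
  (["H", "x", "-", "E"], ["E", "H", "-", "H"])

def Spec_multi_class_evaluation (ss_original : List String) (ss_predicted : List String) (out : List (List Int)) : Prop := out = multi_class_evaluation_alt ss_original ss_predicted
instance (ss_original : List String) (ss_predicted : List String) (out : List (List Int)) : Decidable (Spec_multi_class_evaluation ss_original ss_predicted out) := by unfold Spec_multi_class_evaluation; infer_instance

-- ===== CLAIM (what is proved, stated in full; the proofs are below) =====
def Claim_equal_multi_class_evaluation : Prop := ∀ (ss_original : List String) (ss_predicted : List String), Dom_multi_class_evaluation ss_original ss_predicted → Pre_multi_class_evaluation ss_original ss_predicted → Spec_multi_class_evaluation ss_original ss_predicted (multi_class_evaluation ss_original ss_predicted)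

-- ===== LEMMAS AND PROOFS =====

-- snoc/zip interaction used to peel A's index loop from the right.
lemma zip_snoc {α β : Type} (xs : List α) (a : α) (ys : List β) :
    (xs ++ [a]).zip ys =
      xs.zip ys ++ (match ys.drop xs.length with | [] => [] | b :: _ => [(a, b)]) := by
  induction xs generalizing ys with
  | nil => cases ys <;> simp
  | cons x xs ih =>
    cases ys with
    | nil => simp
    | cons y ys => simp [ih]

-- A's index loop re-expressed as a left fold of the same ladder over the zipped pair list.
lemma take_loop (ss_original ss_predicted : List String)
    (hpre : Pre_multi_class_evaluation ss_original ss_predicted) :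
    ∀ (n : Nat), n ≤ ss_original.length → ∀ (m : List (List Int)),
    (PySem.List.pyRange 0 (n : Int) 1).foldl
      (fun multi_matrix x =>
        let so := PySem.List.pyGetD ss_original x ""
        let sp := PySem.List.pyGetD ss_predicted x ""
        if so = "H" ∧ sp = "H" then pvBump multi_matrix 0 0
        else if so = "H" ∧ sp = "E" then pvBump multi_matrix 1 0
        else if so = "H" ∧ sp = "-" then pvBump multi_matrix 2 0
        else if so = "E" ∧ sp = "H" then pvBump multi_matrix 0 1
        else if so = "E" ∧ sp = "E" then pvBump multi_matrix 1 1
        else if so = "E" ∧ sp = "-" then pvBump multi_matrix 2 1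
        else if so = "-" ∧ sp = "H" then pvBump multi_matrix 0 2
        else if so = "-" ∧ sp = "E" then pvBump multi_matrix 1 2
        else if so = "-" ∧ sp = "-" then pvBump multi_matrix 2 2
        else multi_matrix) m =
    ((ss_original.take n).zip ss_predicted).foldl
      (fun multi_matrix op =>
        if op.1 = "H" ∧ op.2 = "H" then pvBump multi_matrix 0 0
        else if op.1 = "H" ∧ op.2 = "E" then pvBump multi_matrix 1 0
        else if op.1 = "H" ∧ op.2 = "-" then pvBump multi_matrix 2 0
        else if op.1 = "E" ∧ op.2 = "H" then pvBump multi_matrix 0 1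
        else if op.1 = "E" ∧ op.2 = "E" then pvBump multi_matrix 1 1
        else if op.1 = "E" ∧ op.2 = "-" then pvBump multi_matrix 2 1
        else if op.1 = "-" ∧ op.2 = "H" then pvBump multi_matrix 0 2
        else if op.1 = "-" ∧ op.2 = "E" then pvBump multi_matrix 1 2
        else if op.1 = "-" ∧ op.2 = "-" then pvBump multi_matrix 2 2
        else multi_matrix) m := by
  intro n
  induction n with
  | zero => intro _ m; simp [PySem.List.pyRange_one_eq_nil]
  | succ n ih =>
    intro hn m
    have hn' : n ≤ ss_original.length := Nat.le_of_succ_le hn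
    have hlt : n < ss_original.length := hn
    have hsplit : PySem.List.pyRange 0 ((n : Int) + 1) 1 =
        PySem.List.pyRange 0 (n : Int) 1 ++ [(n : Int)] :=
      PySem.List.pyRange_one_succ_right (by exact_mod_cast Nat.zero_le n)
    have hcast : ((n + 1 : Nat) : Int) = (n : Int) + 1 := by push_cast; ring
    rw [hcast, hsplit, List.foldl_append, ih hn']
    have htake : ss_original.take (n + 1) = ss_original.take n ++ [ss_original[n]] :=
      List.take_succ_eq_append_getElem hlt
    rw [htake, zip_snoc]
    have hlen : (ss_original.take n).length = n := List.length_take_of_le hn'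
    have hgo : PySem.List.pyGetD ss_original (n : Int) "" = ss_original[n] := by
      rw [PySem.List.pyGetD_natCast]
      simp [hlt]
    rw [List.foldl_append, hlen]
    by_cases hp : n < ss_predicted.length
    · have hdrop : ss_predicted.drop n = ss_predicted[n] :: ss_predicted.drop (n + 1) :=
        (List.drop_eq_getElem_cons hp)
      have hgp : PySem.List.pyGetD ss_predicted (n : Int) "" = ss_predicted[n] := by
        rw [PySem.List.pyGetD_natCast]
        simp [hp]
      simp only [hdrop, List.foldl_cons, List.foldl_nil]
      simp only [hgo, hgp]
    · -- ss_predicted ends before index n: Pre_ forces ss_original[n] to be no class character,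
      -- so A's step is a no-op, and the zip on B's side is already exhausted.
      have hdrop : ss_predicted.drop n = [] := List.drop_eq_nil_of_le (Nat.le_of_not_lt hp)
      have hno : ss_original[n] ∉ (["H", "E", "-"] : List String) := by
        intro hmem
        exact hp (hpre ⟨n, hlt⟩ hmem)
      simp only [List.mem_cons, List.not_mem_nil, or_false, not_or] at hno
      obtain ⟨h1, h2, h3⟩ := hno
      simp [hdrop, hgo, h1, h2, h3]

-- One pair peeled off a count: the Int-cast count over a cons.
lemma count_cons_pair (x y : String) (rest : List (String × String)) (o p : String) :
    ((PySem.List.count ((x, y) :: rest) (o, p) : Nat) : Int) =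
      (PySem.List.count rest (o, p) : Int) + (if x = o ∧ y = p then 1 else 0) := by
  simp only [PySem.List.count_eq, List.count_cons, beq_iff_eq, Prod.mk.injEq]
  split_ifs <;> push_cast <;> ring

-- pvBump on an explicit 3x3 matrix, one lemma per cell.
lemma pvBump_00 (a b c d e f g h i : Int) :
    pvBump [[a,b,c],[d,e,f],[g,h,i]] 0 0 = [[a+1,b,c],[d,e,f],[g,h,i]] := rfl

lemma pvBump_10 (a b c d e f g h i : Int) :
    pvBump [[a,b,c],[d,e,f],[g,h,i]] 1 0 = [[a,b,c],[d+1,e,f],[g,h,i]] := rfl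

lemma pvBump_20 (a b c d e f g h i : Int) :
    pvBump [[a,b,c],[d,e,f],[g,h,i]] 2 0 = [[a,b,c],[d,e,f],[g+1,h,i]] := rfl

lemma pvBump_01 (a b c d e f g h i : Int) :
    pvBump [[a,b,c],[d,e,f],[g,h,i]] 0 1 = [[a,b+1,c],[d,e,f],[g,h,i]] := rfl

lemma pvBump_11 (a b c d e f g h i : Int) :
    pvBump [[a,b,c],[d,e,f],[g,h,i]] 1 1 = [[a,b,c],[d,e+1,f],[g,h,i]] := rfl

lemma pvBump_21 (a b c d e f g h i : Int) :
    pvBump [[a,b,c],[d,e,f],[g,h,i]] 2 1 = [[a,b,c],[d,e,f],[g,h+1,i]] := rfl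

lemma pvBump_02 (a b c d e f g h i : Int) :
    pvBump [[a,b,c],[d,e,f],[g,h,i]] 0 2 = [[a,b,c+1],[d,e,f],[g,h,i]] := rfl

lemma pvBump_12 (a b c d e f g h i : Int) :
    pvBump [[a,b,c],[d,e,f],[g,h,i]] 1 2 = [[a,b,c],[d,e,f+1],[g,h,i]] := rfl

lemma pvBump_22 (a b c d e f g h i : Int) :
    pvBump [[a,b,c],[d,e,f],[g,h,i]] 2 2 = [[a,b,c],[d,e,f],[g,h,i+1]] := rfl

-- One step of A's ladder on an explicit matrix: each cell gains the 0/1 indicator of its pair.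
lemma step_val (x y : String) (a b c d e f g h i : Int) :
    (if x = "H" ∧ y = "H" then pvBump [[a,b,c],[d,e,f],[g,h,i]] 0 0
      else if x = "H" ∧ y = "E" then pvBump [[a,b,c],[d,e,f],[g,h,i]] 1 0
      else if x = "H" ∧ y = "-" then pvBump [[a,b,c],[d,e,f],[g,h,i]] 2 0
      else if x = "E" ∧ y = "H" then pvBump [[a,b,c],[d,e,f],[g,h,i]] 0 1
      else if x = "E" ∧ y = "E" then pvBump [[a,b,c],[d,e,f],[g,h,i]] 1 1
      else if x = "E" ∧ y = "-" then pvBump [[a,b,c],[d,e,f],[g,h,i]] 2 1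
      else if x = "-" ∧ y = "H" then pvBump [[a,b,c],[d,e,f],[g,h,i]] 0 2
      else if x = "-" ∧ y = "E" then pvBump [[a,b,c],[d,e,f],[g,h,i]] 1 2
      else if x = "-" ∧ y = "-" then pvBump [[a,b,c],[d,e,f],[g,h,i]] 2 2
      else [[a,b,c],[d,e,f],[g,h,i]]) =
      [[a + (if x = "H" ∧ y = "H" then (1:Int) else 0), b + (if x = "E" ∧ y = "H" then (1:Int) else 0), c + (if x = "-" ∧ y = "H" then (1:Int) else 0)],
       [d + (if x = "H" ∧ y = "E" then (1:Int) else 0), e + (if x = "E" ∧ y = "E" then (1:Int) else 0), f + (if x = "-" ∧ y = "E" then (1:Int) else 0)],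
       [g + (if x = "H" ∧ y = "-" then (1:Int) else 0), h + (if x = "E" ∧ y = "-" then (1:Int) else 0), i + (if x = "-" ∧ y = "-" then (1:Int) else 0)]] := by
  by_cases hx1 : x = "H" <;> by_cases hx2 : x = "E" <;> by_cases hx3 : x = "-" <;>
    by_cases hy1 : y = "H" <;> by_cases hy2 : y = "E" <;> by_cases hy3 : y = "-" <;>
    simp_all [pvBump_00, pvBump_10, pvBump_20, pvBump_01, pvBump_11, pvBump_21,
      pvBump_02, pvBump_12, pvBump_22]

-- The ladder fold, started from explicit entries, is the matrix of entry + pair count.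
lemma fold_count (pairs : List (String × String)) :
    ∀ (a b c d e f g h i : Int),
    pairs.foldl
      (fun multi_matrix op =>
        if op.1 = "H" ∧ op.2 = "H" then pvBump multi_matrix 0 0
        else if op.1 = "H" ∧ op.2 = "E" then pvBump multi_matrix 1 0
        else if op.1 = "H" ∧ op.2 = "-" then pvBump multi_matrix 2 0
        else if op.1 = "E" ∧ op.2 = "H" then pvBump multi_matrix 0 1
        else if op.1 = "E" ∧ op.2 = "E" then pvBump multi_matrix 1 1
        else if op.1 = "E" ∧ op.2 = "-" then pvBump multi_matrix 2 1
        else if op.1 = "-" ∧ op.2 = "H" then pvBump multi_matrix 0 2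
        else if op.1 = "-" ∧ op.2 = "E" then pvBump multi_matrix 1 2
        else if op.1 = "-" ∧ op.2 = "-" then pvBump multi_matrix 2 2
        else multi_matrix) [[a,b,c],[d,e,f],[g,h,i]] =
      [[a + PySem.List.count pairs ("H","H"), b + PySem.List.count pairs ("E","H"), c + PySem.List.count pairs ("-","H")],
       [d + PySem.List.count pairs ("H","E"), e + PySem.List.count pairs ("E","E"), f + PySem.List.count pairs ("-","E")],
       [g + PySem.List.count pairs ("H","-"), h + PySem.List.count pairs ("E","-"), i + PySem.List.count pairs ("-","-")]] := by
  induction pairs with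
  | nil => intro a b c d e f g h i; simp [PySem.List.count]
  | cons op rest ih =>
    obtain ⟨x, y⟩ := op
    intro a b c d e f g h i
    rw [List.foldl_cons]
    show List.foldl _ (if x = "H" ∧ y = "H" then pvBump [[a,b,c],[d,e,f],[g,h,i]] 0 0
      else if x = "H" ∧ y = "E" then pvBump [[a,b,c],[d,e,f],[g,h,i]] 1 0
      else if x = "H" ∧ y = "-" then pvBump [[a,b,c],[d,e,f],[g,h,i]] 2 0
      else if x = "E" ∧ y = "H" then pvBump [[a,b,c],[d,e,f],[g,h,i]] 0 1
      else if x = "E" ∧ y = "E" then pvBump [[a,b,c],[d,e,f],[g,h,i]] 1 1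
      else if x = "E" ∧ y = "-" then pvBump [[a,b,c],[d,e,f],[g,h,i]] 2 1
      else if x = "-" ∧ y = "H" then pvBump [[a,b,c],[d,e,f],[g,h,i]] 0 2
      else if x = "-" ∧ y = "E" then pvBump [[a,b,c],[d,e,f],[g,h,i]] 1 2
      else if x = "-" ∧ y = "-" then pvBump [[a,b,c],[d,e,f],[g,h,i]] 2 2
      else [[a,b,c],[d,e,f],[g,h,i]]) rest = _
    rw [step_val, ih]
    simp only [count_cons_pair, List.cons.injEq, and_true]
    and_intros <;> ring

-- ===== VERDICT (by name: the statement is the Claim_ definition above) =====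
theorem multi_class_evaluation_spec : Claim_equal_multi_class_evaluation := by
  intro ss_original ss_predicted _ hpre
  unfold Spec_multi_class_evaluation multi_class_evaluation multi_class_evaluation_alt
  have h := take_loop ss_original ss_predicted hpre ss_original.length le_rfl
    [[0,0,0],[0,0,0],[0,0,0]]
  rw [List.take_length, fold_count] at h
  simpa [PySem.List.len] using h
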